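-- pv_equiv track=rewrite | github.com/revaldinho/f100l | src/F100_Opcodes/OpcodeF0_Shift.py | d_sll
-- ===== SOURCE A (Python) =====
-- def d_sll(a,o,num):
--     # Double shift left logical of 16b ACC + OR returning
--     # two new 16 bit numbers
--     overflow = 0
--     operand = (a<<16) | o
--     source = operand
--     for i in range(0, num):
--         operand = (operand << 1)
--         if (operand & 0x80000000) != (source & 0x80000000):
--             overflow = 1
--     return (operand>>16 & 0xFFFF, operand & 0xFFFF, overflow)
-- ===== SOURCE B (Python) =====
-- def d_sll(a, o, num):
--     # O(1) bit-mask re-implementation: result = 32-bit value shifted mod 2^32;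
--     # overflow iff the top num+1 bits of the 32-bit operand are not all equal.
--     v = ((a << 16) | o) & 0xFFFFFFFF
--     n = num if num > 0 else 0
--     if n == 0:
--         overflow = 0
--     elif n <= 31:
--         top = v >> (31 - n)
--         overflow = 0 if top == 0 or top == (1 << (n + 1)) - 1 else 1
--     else:
--         overflow = 0 if v == 0 else 1
--     w = (v << n) & 0xFFFFFFFF if n < 32 else 0
--     return (w >> 16, w & 0xFFFF, overflow)
-- ===== Notes on version B (the rewrite author's own statement) =====
-- stated objective: faster
-- what changed: A shifts the 32-bit operand left one bit at a time in an O(num) loop, testing bit 31 at every step; B computes the shifted result directly as (operand << num) mod 2^32 and detects overflow in O(1) by checking whether the top num+1 bits of the 32-bit operand are all equal.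
import Mathlib
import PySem

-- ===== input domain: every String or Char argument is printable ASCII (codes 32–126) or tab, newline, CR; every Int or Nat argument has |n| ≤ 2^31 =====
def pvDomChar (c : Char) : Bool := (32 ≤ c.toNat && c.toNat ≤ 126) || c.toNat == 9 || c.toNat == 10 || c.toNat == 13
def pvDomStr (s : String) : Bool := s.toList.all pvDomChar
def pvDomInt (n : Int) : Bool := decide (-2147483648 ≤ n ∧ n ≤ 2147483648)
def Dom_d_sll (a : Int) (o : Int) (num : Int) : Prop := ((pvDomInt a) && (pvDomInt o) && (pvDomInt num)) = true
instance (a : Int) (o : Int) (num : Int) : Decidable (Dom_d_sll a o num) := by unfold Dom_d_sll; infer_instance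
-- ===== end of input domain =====

-- B replaces A's O(num) shift-and-test loop by an O(1) bit-mask computation
-- (result = 32-bit operand shifted, taken mod 2^32; overflow iff the top num+1
-- bits of the 32-bit operand are not all equal); objective: faster.

-- ===== PORT A =====
def d_sll (a : Int) (o : Int) (num : Int) : List Int :=
  let source : Int := PySem.Int.bor (a <<< (16 : Nat)) o
  let r : Int × Int :=
    (PySem.List.pyRange 0 num 1).foldl
      (fun s _ =>
        ((s.1 <<< (1 : Nat) : Int),
          if PySem.Int.band (s.1 <<< (1 : Nat)) 2147483648 ≠ PySem.Int.band source 2147483648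
          then (1 : Int) else s.2))
      (source, 0)
  [PySem.Int.band (r.1 >>> (16 : Nat)) 65535, PySem.Int.band r.1 65535, r.2]

-- ===== PORT B =====
def d_sll_alt (a : Int) (o : Int) (num : Int) : List Int :=
  let v : Int := PySem.Int.band (PySem.Int.bor (a <<< (16 : Nat)) o) 4294967295
  let n : Nat := if 0 < num then num.toNat else 0
  let overflow : Int :=
    if n = 0 then 0
    else if n ≤ 31 then
      let top := v >>> (31 - n)
      if top = 0 ∨ top = 2 ^ (n + 1) - 1 then 0 else 1
    else if v = 0 then 0 else 1
  let w : Int := if n < 32 then PySem.Int.band (v <<< n) 4294967295 else 0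
  [w >>> (16 : Nat), PySem.Int.band w 65535, overflow]

-- ===== PRECONDITION & SPEC =====
def Spec_d_sll (a : Int) (o : Int) (num : Int) (out : List Int) : Prop := out = d_sll_alt a o num
instance (a : Int) (o : Int) (num : Int) (out : List Int) : Decidable (Spec_d_sll a o num out) := by unfold Spec_d_sll; infer_instance

-- ===== CLAIM (what is proved, stated in full; the proofs are below) =====
def Claim_equal_d_sll : Prop := ∀ (a : Int) (o : Int) (num : Int), Dom_d_sll a o num → Spec_d_sll a o num (d_sll a o num)

-- ===== LEMMAS AND PROOFS =====

-- Python x & 0xFFFF is x mod 2^16 (two's complement; holds for negative x too).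
lemma nat_and_mask16 (y : Nat) : y &&& 65535 = y % 65536 := by
  have := Nat.and_two_pow_sub_one_eq_mod y 16; norm_num at this; exact this

lemma nat_and_mask32 (y : Nat) : y &&& 4294967295 = y % 4294967296 := by
  have := Nat.and_two_pow_sub_one_eq_mod y 32; norm_num at this; exact this

lemma nat_and_bit31 (y : Nat) : y &&& 2147483648 = y / 2147483648 % 2 * 2147483648 := by
  have h := Nat.and_two_pow y 31
  rw [Nat.testBit_eq_decide_div_mod_eq] at h
  norm_num at h
  rcases Nat.mod_two_eq_zero_or_one (y / 2147483648) with hm | hm <;> simp [hm] at h ⊢ <;> omega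

lemma band_mask16 (x : Int) : PySem.Int.band x 65535 = x % 65536 := by
  unfold PySem.Int.band
  split_ifs with h1 h2 h3 <;>
    first
      | omega
      | (simp only [show Int.toNat 65535 = 65535 from rfl]; rw [nat_and_mask16]; omega)
      | (simp only [show Int.toNat 65535 = 65535 from rfl]; rw [Nat.and_comm, nat_and_mask16]; omega)

-- Python x & 0xFFFFFFFF is x mod 2^32.
lemma band_mask32 (x : Int) : PySem.Int.band x 4294967295 = x % 4294967296 := by
  unfold PySem.Int.band
  split_ifs with h1 h2 h3 <;>
    first
      | omega
      | (simp only [show Int.toNat 4294967295 = 4294967295 from rfl]; rw [nat_and_mask32]; omega)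
      | (simp only [show Int.toNat 4294967295 = 4294967295 from rfl]; rw [Nat.and_comm, nat_and_mask32]; omega)

-- Python x & 0x80000000 extracts bit 31 (two's complement; holds for negative x too).
lemma band_bit31 (x : Int) : PySem.Int.band x 2147483648 = x / 2147483648 % 2 * 2147483648 := by
  unfold PySem.Int.band
  split_ifs with h1 h2 h3 <;>
    first
      | omega
      | (simp only [show Int.toNat 2147483648 = 2147483648 from rfl]; rw [nat_and_bit31]; omega)
      | (simp only [show Int.toNat 2147483648 = 2147483648 from rfl]; rw [Nat.and_comm, nat_and_bit31]; omega)

-- A's loop in closed form: operand after m steps, overflow as an existential over the steps.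
lemma loopA (src : Int) (m : Nat) :
    (PySem.List.pyRange 0 (m : Int) 1).foldl
      (fun (s : Int × Int) (_ : Int) =>
        ((s.1 <<< (1 : Nat) : Int),
          if PySem.Int.band (s.1 <<< (1 : Nat)) 2147483648 ≠ PySem.Int.band src 2147483648
          then (1 : Int) else s.2))
      (src, 0)
    = (src * 2 ^ m,
       if ∃ k < m, PySem.Int.band (src * 2 ^ (k + 1)) 2147483648 ≠ PySem.Int.band src 2147483648
       then 1 else 0) := by
  induction m with
  | zero => simp [PySem.List.pyRange_one_eq_nil (le_refl (0 : Int))]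
  | succ m ih =>
    have hcast : ((m + 1 : Nat) : Int) = (m : Int) + 1 := by push_cast; ring
    rw [hcast, PySem.List.pyRange_one_succ_right (by positivity), List.foldl_append, ih]
    simp only [List.foldl_cons, List.foldl_nil]
    have hsh : (src * 2 ^ m) <<< (1 : Nat) = src * 2 ^ (m + 1) := by
      rw [Int.shiftLeft_eq]; ring
    rw [hsh]
    refine Prod.ext rfl ?_
    have hiff : (∃ k < m + 1, PySem.Int.band (src * 2 ^ (k + 1)) 2147483648 ≠ PySem.Int.band src 2147483648)
        ↔ (∃ k < m, PySem.Int.band (src * 2 ^ (k + 1)) 2147483648 ≠ PySem.Int.band src 2147483648)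
          ∨ PySem.Int.band (src * 2 ^ (m + 1)) 2147483648 ≠ PySem.Int.band src 2147483648 := by
      constructor
      · rintro ⟨k, hk, hp⟩
        rcases Nat.lt_succ_iff_lt_or_eq.1 hk with h | h
        · exact Or.inl ⟨k, h, hp⟩
        · subst h; exact Or.inr hp
      · rintro (⟨k, hk, hp⟩ | hp)
        · exact ⟨k, Nat.lt_succ_of_lt hk, hp⟩
        · exact ⟨m, Nat.lt_succ_self m, hp⟩
    by_cases hnow : PySem.Int.band (src * 2 ^ (m + 1)) 2147483648 ≠ PySem.Int.band src 2147483648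
    · rw [if_pos hnow, if_pos (hiff.2 (Or.inr hnow))]
    · by_cases hex : ∃ k < m, PySem.Int.band (src * 2 ^ (k + 1)) 2147483648 ≠ PySem.Int.band src 2147483648
      · rw [if_neg hnow, if_pos hex, if_pos (hiff.2 (Or.inl hex))]
      · rw [if_neg hnow, if_neg hex, if_neg (fun h => (hiff.1 h).elim (fun h1 => hex h1) (fun h2 => hnow h2))]

-- Bit j (j < 32) of x mod 2^32 is bit j of x.
lemma emod_pow_div_mod_two (x : Int) (j : Nat) (hj : j < 32) :
    (x % 4294967296) / 2 ^ j % 2 = x / 2 ^ j % 2 := by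
  have h32 : (2 : Int) ^ j * 2 ^ (32 - j) = 4294967296 := by
    rw [← pow_add, show j + (32 - j) = 32 by omega]; norm_num
  obtain ⟨q, hq⟩ : ∃ q, x = 4294967296 * q + x % 4294967296 := ⟨x / 4294967296, by omega⟩
  have hx2 : x = x % 4294967296 + 2 ^ j * (2 ^ (32 - j) * q) := by
    rw [← mul_assoc, h32]; omega
  have hdiv : x / 2 ^ j = x % 4294967296 / 2 ^ j + 2 ^ (32 - j) * q := by
    nth_rewrite 1 [hx2]
    rw [Int.add_mul_ediv_left _ _ (by positivity : ((2 : Int) ^ j) ≠ 0)]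
  obtain ⟨c, hc⟩ : ∃ c, (2 : Int) ^ (32 - j) = 2 * c :=
    ⟨2 ^ (32 - j - 1), by rw [← pow_succ', show 32 - j - 1 + 1 = 32 - j by omega]⟩
  rw [hdiv, hc]
  generalize (x % 4294967296) / 2 ^ j = d
  generalize hce : c * q = e
  have h2e : 2 * c * q = 2 * e := by rw [mul_assoc, hce]
  rw [h2e]
  omega

-- Shifting left by k ≤ 31 moves bit 31-k to bit 31.
lemma shift_bit (src : Int) (k : Nat) (hk : k ≤ 31) :
    src * 2 ^ k / 2 ^ 31 = src / 2 ^ (31 - k) := by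
  have h : (2 : Int) ^ 31 = 2 ^ k * 2 ^ (31 - k) := by rw [← pow_add, show k + (31 - k) = 31 by omega]
  rw [h, mul_comm src, Int.mul_ediv_mul_of_pos _ _ (by positivity : (0 : Int) < 2 ^ k)]

-- Shifting left by k ≥ 32 leaves 0 in bit 31.
lemma shift_bit_big (src : Int) (k : Nat) (hk : 32 ≤ k) :
    src * 2 ^ k / 2 ^ 31 % 2 = 0 := by
  have h : src * 2 ^ k = 2 ^ 31 * (2 * (src * 2 ^ (k - 32))) := by
    have : (2 : Int) ^ k = 2 ^ 31 * (2 * 2 ^ (k - 32)) := by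
      rw [show (2 : Int) ^ 31 * (2 * 2 ^ (k - 32)) = 2 ^ (31 + (1 + (k - 32))) by
        rw [pow_add, pow_add, pow_one], show 31 + (1 + (k - 32)) = k by omega]
    rw [this]; ring
  rw [h, Int.mul_ediv_cancel_left _ (by positivity : ((2 : Int) ^ 31) ≠ 0), Int.mul_emod_right]

-- A number below 2^(m+1) has its low m bits all equal to bit m iff it is 0 or 2^(m+1)-1.
lemma allBitsEq (t m : Nat) (ht : t < 2 ^ (m + 1)) :
    (∀ j < m, t.testBit j = t.testBit m) ↔ (t = 0 ∨ t = 2 ^ (m + 1) - 1) := by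
  constructor
  · intro h
    cases hm : t.testBit m with
    | false =>
      left
      apply Nat.eq_of_testBit_eq; intro i
      rw [Nat.zero_testBit]
      rcases lt_trichotomy i m with hi | hi | hi
      · rw [h i hi, hm]
      · rw [hi, hm]
      · exact Nat.testBit_lt_two_pow (lt_of_lt_of_le ht (pow_le_pow_right₀ (by norm_num) (by omega)))
    | true =>
      right
      apply Nat.eq_of_testBit_eq; intro i
      rw [Nat.testBit_two_pow_sub_one]
      rcases lt_trichotomy i m with hi | hi | hi
      · rw [h i hi, hm]; simp [show i < m + 1 by omega]
      · rw [hi, hm]; simp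
      · rw [Nat.testBit_lt_two_pow (lt_of_lt_of_le ht (pow_le_pow_right₀ (by norm_num) (by omega)))]
        simp [show ¬ i < m + 1 by omega]
  · rintro (rfl | rfl) j hj
    · simp
    · simp [Nat.testBit_two_pow_sub_one]; omega

-- The overflow flag A accumulates, characterised by B's closed-form test.
lemma ov_iff (src : Int) (m : Nat) (hm : 1 ≤ m) :
    (¬ ∃ k < m, PySem.Int.band (src * 2 ^ (k + 1)) 2147483648 ≠ PySem.Int.band src 2147483648)
    ↔ (if m ≤ 31 then
         (src % 4294967296 / 2 ^ (31 - m) = 0 ∨ src % 4294967296 / 2 ^ (31 - m) = 2 ^ (m + 1) - 1)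
       else src % 4294967296 = 0) := by
  push Not
  set V : Nat := (src % 4294967296).toNat with hVdef
  have hV : (V : Int) = src % 4294967296 := by rw [hVdef]; omega
  have hVlt : V < 2 ^ 32 := by omega
  have hbit : ∀ j : Nat, j < 32 → src / 2 ^ j % 2 = ((V / 2 ^ j % 2 : Nat) : Int) := by
    intro j hj
    rw [← emod_pow_div_mod_two src j hj, ← hV]
    push_cast [Int.natCast_div]
    ring
  have hband : ∀ x : Int, (PySem.Int.band x 2147483648 = PySem.Int.band src 2147483648
      ↔ x / 2 ^ 31 % 2 = src / 2 ^ 31 % 2) := by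
    intro x
    rw [band_bit31, band_bit31]
    constructor
    · intro h; norm_num at h; omega
    · intro h; norm_num; omega
  have hcond : ∀ k : Nat, 1 ≤ k →
      (PySem.Int.band (src * 2 ^ k) 2147483648 = PySem.Int.band src 2147483648
        ↔ (if k ≤ 31 then V.testBit (31 - k) = V.testBit 31 else V.testBit 31 = false)) := by
    intro k hk1
    rw [hband]
    by_cases hk : k ≤ 31
    · rw [if_pos hk, shift_bit src k hk, hbit (31 - k) (by omega), hbit 31 (by norm_num),
        Nat.testBit_eq_decide_div_mod_eq, Nat.testBit_eq_decide_div_mod_eq]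
      rcases Nat.mod_two_eq_zero_or_one (V / 2 ^ (31 - k)) with ha | ha <;>
        rcases Nat.mod_two_eq_zero_or_one (V / 2 ^ 31) with hb | hb <;>
        rw [ha, hb] <;> simp
    · rw [if_neg hk, shift_bit_big src k (by omega), hbit 31 (by norm_num),
        Nat.testBit_eq_decide_div_mod_eq]
      rcases Nat.mod_two_eq_zero_or_one (V / 2 ^ 31) with hb | hb <;> rw [hb] <;> simp
  by_cases hm31 : m ≤ 31
  · rw [if_pos hm31]
    set T : Nat := V / 2 ^ (31 - m) with hTdef
    have hTlt : T < 2 ^ (m + 1) := by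
      rw [hTdef]
      apply (Nat.div_lt_iff_lt_mul (by positivity)).2
      calc V < 2 ^ 32 := hVlt
        _ = 2 ^ (m + 1) * 2 ^ (31 - m) := by rw [← pow_add, show m + 1 + (31 - m) = 32 by omega]
    have hTbit : ∀ j : Nat, j ≤ m → T.testBit j = V.testBit (31 - m + j) := by
      intro j hj
      rw [hTdef, Nat.testBit_div_two_pow, Nat.add_comm]
    have hTint : (T : Int) = src % 4294967296 / 2 ^ (31 - m) := by
      rw [hTdef, ← hV]
      push_cast [Int.natCast_div]
      ring
    have step1 : (∀ k < m, PySem.Int.band (src * 2 ^ (k + 1)) 2147483648 = PySem.Int.band src 2147483648)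
        ↔ (∀ j < m, T.testBit j = T.testBit m) := by
      constructor
      · intro h j hj
        have hc := h (m - j - 1) (by omega)
        rw [hcond (m - j - 1 + 1) (by omega), if_pos (by omega : m - j - 1 + 1 ≤ 31),
          show m - j - 1 + 1 = m - j by omega] at hc
        rw [hTbit j (by omega), hTbit m (le_refl m),
          show 31 - m + j = 31 - (m - j) by omega, show 31 - m + m = 31 by omega]
        exact hc
      · intro h k hk
        rw [hcond (k + 1) (by omega), if_pos (by omega : k + 1 ≤ 31)]
        have hc := h (m - (k + 1)) (by omega)
        rw [hTbit (m - (k + 1)) (by omega), hTbit m (le_refl m),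
          show 31 - m + (m - (k + 1)) = 31 - (k + 1) by omega, show 31 - m + m = 31 by omega] at hc
        exact hc
    have hnot : (∀ k < m, PySem.Int.band (src * 2 ^ (k + 1)) 2147483648 = PySem.Int.band src 2147483648)
        ↔ ¬ ∃ k < m, PySem.Int.band (src * 2 ^ (k + 1)) 2147483648 ≠ PySem.Int.band src 2147483648 := by
      push Not; rfl
    rw [← hnot] at *
    rw [step1, allBitsEq T m hTlt, ← hTint]
    constructor
    · rintro (h | h)
      · left; exact_mod_cast h
      · right
        rw [h]
        push_cast [Nat.one_le_two_pow]
        ring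
    · rintro (h | h)
      · left; exact_mod_cast h
      · right
        have h2 : ((2 ^ (m + 1) - 1 : Nat) : Int) = 2 ^ (m + 1) - 1 := by
          push_cast [Nat.one_le_two_pow]; ring
        omega
  · rw [if_neg hm31]
    constructor
    · intro h
      have hb31 : V.testBit 31 = false := by
        have hc := h 31 (by omega)
        rw [hcond 32 (by omega), if_neg (by omega)] at hc
        exact hc
      have hV0 : V = 0 := by
        apply Nat.eq_of_testBit_eq; intro i
        rw [Nat.zero_testBit]
        by_cases hi : i ≤ 30
        · have hc := h (30 - i) (by omega)
          rw [hcond (30 - i + 1) (by omega), if_pos (by omega),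
            show 31 - (30 - i + 1) = i by omega] at hc
          rw [hc, hb31]
        · by_cases hi31 : i = 31
          · rw [hi31, hb31]
          · exact Nat.testBit_lt_two_pow (lt_of_lt_of_le hVlt (pow_le_pow_right₀ (by norm_num) (by omega)))
      omega
    · intro h k hk
      have hV0 : V = 0 := by omega
      rw [hcond (k + 1) (by omega)]
      by_cases hk31 : k + 1 ≤ 31
      · rw [if_pos hk31, hV0]; simp
      · rw [if_neg hk31, hV0]; simp

-- Main equivalence.
lemma d_sll_eq (a o num : Int) : d_sll a o num = d_sll_alt a o num := by
  unfold d_sll d_sll_alt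
  simp only []
  set src : Int := PySem.Int.bor (a <<< (16 : Nat)) o with hsrc
  by_cases hnum : 0 < num
  · -- positive shift count
    obtain ⟨m, hm⟩ : ∃ m : Nat, (m : Int) = num := ⟨num.toNat, by omega⟩
    have hm1 : 1 ≤ m := by omega
    rw [← hm, loopA src m]
    dsimp only
    have hn : (if (0 : Int) < (m : Int) then ((m : Int)).toNat else 0) = m := by
      rw [if_pos (by omega : (0 : Int) < (m : Int))]; omega
    rw [hn]
    simp only [band_mask32]
    have hw : (if m < 32 then ((src % 4294967296) <<< m) % 4294967296 else 0)
        = src * 2 ^ m % 4294967296 := by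
      by_cases hm32 : m < 32
      · rw [if_pos hm32, Int.shiftLeft_eq]
        rw [Int.mul_emod, Int.emod_emod_of_dvd _ dvd_rfl, ← Int.mul_emod]
      · rw [if_neg hm32]
        have : (4294967296 : Int) ∣ src * 2 ^ m := by
          refine ⟨src * 2 ^ (m - 32), ?_⟩
          rw [show src * 2 ^ m = src * ((2 : Int) ^ (32 : Nat) * 2 ^ (m - 32)) by
            rw [← pow_add, show 32 + (m - 32) = m by omega]]
          norm_num; ring
        omega
    rw [hw]
    have hov : (if ∃ k < m, PySem.Int.band (src * 2 ^ (k + 1)) 2147483648 ≠ PySem.Int.band src 2147483648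
          then (1 : Int) else 0)
        = (if m = 0 then (0 : Int)
           else if m ≤ 31 then
             if (src % 4294967296) >>> (31 - m) = 0 ∨ (src % 4294967296) >>> (31 - m) = 2 ^ (m + 1) - 1
             then 0 else 1
           else if (src % 4294967296) = 0 then 0 else 1) := by
      rw [if_neg (by omega : ¬ m = 0)]
      have hiff := ov_iff src m hm1
      rw [Int.shiftRight_eq_div_pow]
      push_cast
      by_cases hm31 : m ≤ 31
      · rw [if_pos hm31] at hiff ⊢
        by_cases hex : ∃ k < m, PySem.Int.band (src * 2 ^ (k + 1)) 2147483648 ≠ PySem.Int.band src 2147483648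
        · rw [if_pos hex, if_neg (by rw [← hiff]; simpa using hex)]
        · rw [if_neg hex, if_pos (hiff.1 hex)]
      · rw [if_neg hm31] at hiff ⊢
        by_cases hex : ∃ k < m, PySem.Int.band (src * 2 ^ (k + 1)) 2147483648 ≠ PySem.Int.band src 2147483648
        · rw [if_pos hex, if_neg (by rw [← hiff]; simpa using hex)]
        · rw [if_neg hex, if_pos (hiff.1 hex)]
    rw [hov]
    simp only [Int.shiftRight_eq_div_pow, band_mask16]
    norm_num
    try congr 1
    all_goals omega
  · -- num ≤ 0: empty loop
    rw [PySem.List.pyRange_one_eq_nil (by omega : num ≤ 0)]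
    dsimp only [List.foldl_nil]
    rw [if_neg hnum]
    rw [if_pos rfl, if_pos (by norm_num : (0 : Nat) < 32)]
    simp only [band_mask32, Int.shiftLeft_eq, Int.shiftRight_eq_div_pow, band_mask16]
    norm_num
    try congr 1
    all_goals omega

-- ===== VERDICT (by name: the statement is the Claim_ definition above) =====
theorem d_sll_spec : Claim_equal_d_sll := by
  intro a o num _
  unfold Spec_d_sll
  exact d_sll_eq a o num
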